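-- pv_equiv track=rewrite | github.com/thukhapyaesone1/Chemical-PFD-Web-Desktop | desktop-frontend/src/canvas/resources.py | get_component_config_by_name
-- ===== SOURCE A (Python) =====
-- def clean_string(s):
--     return s.lower().translate(str.maketrans("", "", " ,_/-()"))
--
-- def get_component_config_by_name(name, component_config):
--     # ID_MAP removed (Legacy)
--     # name = ID_MAP.get(name, name)
--
--     if name in component_config:
--         return component_config[name]
--
--     target = clean_string(name)
--     for key, cfg in component_config.items():
--         if clean_string(key) == target:
--             return cfg
--
--     return {}
-- ===== SOURCE B (Python) =====
-- def clean_string(s):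
--     return s.lower().translate(str.maketrans("", "", " ,_/-()"))
--
-- def get_component_config_by_name(name, component_config):
--     if name in component_config:
--         return component_config[name]
--     index = {}
--     for key, cfg in component_config.items():
--         index.setdefault(clean_string(key), cfg)
--     return index.get(clean_string(name), {})
-- ===== Notes on version B (the rewrite author's own statement) =====
-- stated objective: alternative
-- what changed: After the exact-key fast path, B builds a reverse index keyed by the cleaned name with first-wins setdefault and does a single dict lookup, instead of A's inline scan that cleans and compares each key with an early return.
import Mathlib
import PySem

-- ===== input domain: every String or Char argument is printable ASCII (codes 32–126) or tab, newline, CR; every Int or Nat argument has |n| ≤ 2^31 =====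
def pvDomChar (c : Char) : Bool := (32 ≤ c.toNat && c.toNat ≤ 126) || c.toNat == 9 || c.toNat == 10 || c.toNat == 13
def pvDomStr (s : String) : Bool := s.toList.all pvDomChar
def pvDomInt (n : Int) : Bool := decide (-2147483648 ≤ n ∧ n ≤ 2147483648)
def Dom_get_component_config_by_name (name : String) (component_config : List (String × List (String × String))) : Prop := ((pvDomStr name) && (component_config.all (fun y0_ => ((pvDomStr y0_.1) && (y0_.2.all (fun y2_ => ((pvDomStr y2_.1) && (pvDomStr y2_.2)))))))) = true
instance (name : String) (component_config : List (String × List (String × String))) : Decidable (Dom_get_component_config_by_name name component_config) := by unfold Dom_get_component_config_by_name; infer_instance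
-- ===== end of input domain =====

-- B replaces A's inline clean-and-compare scan by a first-wins reverse index (setdefault) plus one lookup; alternative decomposition, same cost.

-- ===== PORT A =====
-- clean_string: s.lower().translate(str.maketrans("", "", " ,_/-()")).
-- translate with an all-delete table is exactly a filter over the code points; lower is ASCII-exact via PySem.Str.lower.
def clean_string (s : String) : String :=
  String.ofList (((PySem.Str.lower s).toList).filter (fun c => !([' ', ',', '_', '/', '-', '(', ')'].contains c)))

-- the 'for key, cfg in component_config.items(): if clean_string(key) == target: return cfg' loop (early return)
def pvScanA (target : String) : List (String × List (String × String)) → List (String × String)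
  | [] => []
  | (key, cfg) :: rest => if clean_string key == target then cfg else pvScanA target rest

def get_component_config_by_name (name : String) (component_config : List (String × List (String × String))) : List (String × String) :=
  -- 'if name in component_config: return component_config[name]' (dict key membership + lookup = first match)
  match (PySem.Dict.mk component_config).get? name with
  | some v => v
  | none =>
    let target := clean_string name
    pvScanA target component_config

-- ===== PORT B =====
def get_component_config_by_name_alt (name : String) (component_config : List (String × List (String × String))) : List (String × String) :=
  match (PySem.Dict.mk component_config).get? name with
  | some v => v
  | none =>
    -- index = {}; for key, cfg in items: index.setdefault(clean_string(key), cfg)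
    let index := component_config.foldl (fun d p => d.setdefault (clean_string p.1) p.2) PySem.Dict.empty
    index.getD (clean_string name) []

-- ===== PRECONDITION & SPEC =====
def Spec_get_component_config_by_name (name : String) (component_config : List (String × List (String × String))) (out : List (String × String)) : Prop := out = get_component_config_by_name_alt name component_config
instance (name : String) (component_config : List (String × List (String × String))) (out : List (String × String)) : Decidable (Spec_get_component_config_by_name name component_config out) := by unfold Spec_get_component_config_by_name; infer_instance

-- ===== CLAIM (what is proved, stated in full; the proofs are below) =====
def Claim_equal_get_component_config_by_name : Prop := ∀ (name : String) (component_config : List (String × List (String × String))), Dom_get_component_config_by_name name component_config → Spec_get_component_config_by_name name component_config (get_component_config_by_name name component_config)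

-- ===== LEMMAS AND PROOFS =====

-- option-valued version of A's scan
def pvScanA? (target : String) : List (String × List (String × String)) → Option (List (String × String))
  | [] => none
  | (key, cfg) :: rest => if clean_string key == target then some cfg else pvScanA? target rest

theorem pvScanA_eq_getD (t : String) (l : List (String × List (String × String))) :
    pvScanA t l = (pvScanA? t l).getD [] := by
  induction l with
  | nil => rfl
  | cons p rest ih =>
    obtain ⟨k, c⟩ := p
    simp only [pvScanA, pvScanA?]
    split <;> simp [ih]

theorem pv_fold_setdefault_get? (t : String) (l : List (String × List (String × String)))
    (d : PySem.Dict String (List (String × String))) :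
    (l.foldl (fun d p => d.setdefault (clean_string p.1) p.2) d).get? t =
      ((d.get? t).orElse (fun _ => pvScanA? t l)) := by
  induction l generalizing d with
  | nil => cases h : d.get? t <;> simp [Option.orElse, pvScanA?, h]
  | cons p rest ih =>
    obtain ⟨k, c⟩ := p
    simp only [List.foldl_cons, ih]
    by_cases hk : t = clean_string k
    · subst hk
      rw [PySem.Dict.get?_setdefault_self]
      cases d.get? (clean_string k) <;> simp [Option.orElse, pvScanA?]
    · rw [PySem.Dict.get?_setdefault_of_ne _ _ hk]
      cases d.get? t <;> simp [Option.orElse, pvScanA?, Ne.symm hk, beq_iff_eq]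

-- ===== VERDICT (by name: the statement is the Claim_ definition above) =====
theorem get_component_config_by_name_spec : Claim_equal_get_component_config_by_name := by
  intro name cc _
  unfold Spec_get_component_config_by_name get_component_config_by_name get_component_config_by_name_alt
  cases h : (PySem.Dict.mk cc).get? name with
  | some v => simp
  | none =>
    rw [PySem.Dict.getD_eq_get?_getD, pv_fold_setdefault_get?, PySem.Dict.get?_empty]
    simp [Option.orElse, pvScanA_eq_getD]
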